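-- pv_equiv track=rewrite | github.com/bishal5917/LeetCoding | Python/MaximizeExpression.py | MaximizeExpressionOptimal
-- ===== SOURCE A (Python) =====
-- def MaximizeExpressionOptimal(arr):
--     a = [item for item in arr]
--     ab = [0 for _ in arr]
--     abc = [0 for _ in arr]
--     abcd = [0 for _ in arr]
--     for i in range(1, len(arr)):
--         # max of a
--         a[i] = max(arr[i], a[i - 1])
--
--     for i in range(1, len(arr)):
--         # max of a-b
--         ab[i] = max(a[i - 1] - arr[i], ab[i - 1])
--
--     for i in range(2, len(arr)):
--         # max of a-b+c
--         abc[i] = max(ab[i - 1] + arr[i], abc[i - 1])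
--
--     for i in range(3, len(arr)):
--         # max of a-b+c-d
--         abcd[i] = max(abc[i - 1] - arr[i], abcd[i - 1])
--
--     return abcd[len(arr) - 1]
-- ===== SOURCE B (Python) =====
-- def MaximizeExpressionOptimal(arr):
--     a = arr[0]
--     ab = abc = abcd = 0
--     for i in range(1, len(arr)):
--         x = arr[i]
--         if i >= 3:
--             abcd = max(abc - x, abcd)
--         if i >= 2:
--             abc = max(ab + x, abc)
--         ab = max(a - x, ab)
--         a = max(x, a)
--     return abcd
-- ===== Notes on version B (the rewrite author's own statement) =====
-- stated objective: faster
-- what changed: Replaced the four sequential O(n) DP arrays (built by four separate index loops plus four list comprehensions) with a single forward pass over arr that maintains four scalar running maxima updated in reverse dependency order.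
import Mathlib
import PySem

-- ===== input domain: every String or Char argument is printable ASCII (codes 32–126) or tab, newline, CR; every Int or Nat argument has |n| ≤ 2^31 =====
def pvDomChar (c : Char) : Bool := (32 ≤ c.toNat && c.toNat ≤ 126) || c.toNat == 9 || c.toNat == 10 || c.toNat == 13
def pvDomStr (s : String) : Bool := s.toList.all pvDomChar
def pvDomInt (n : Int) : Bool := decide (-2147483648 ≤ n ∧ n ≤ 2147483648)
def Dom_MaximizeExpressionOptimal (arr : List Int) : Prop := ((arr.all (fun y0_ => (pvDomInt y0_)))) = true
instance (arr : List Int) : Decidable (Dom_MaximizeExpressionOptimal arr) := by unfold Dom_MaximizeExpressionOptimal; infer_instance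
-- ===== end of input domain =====

-- B collapses A's four DP-array passes into one forward pass keeping four scalar running maxima (O(1) space, one traversal).
-- Pre_ excludes the empty list, where both A and B raise IndexError.


-- ===== PORT A =====
-- each of A's four loops has the shape "for i in range(s, len(arr)): xs[i] = max(<body i>, xs[i-1])";
-- pvPass transliterates that loop, parameterised by the body expression <body>.
-- All indexed accesses use pyGetD with default 0: every index reached by the loops is in range
-- (the only possibly-failing access is abcd[len(arr)-1] on the empty list, excluded by Pre_).
def pvPass (n s : Int) (body : Int → Int) (xs0 : List Int) : List Int :=
  (PySem.List.pyRange s n 1).foldl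
    (fun xs i => xs.set i.toNat (max (body i) (PySem.List.pyGetD xs (i - 1) 0))) xs0

def MaximizeExpressionOptimal (arr : List Int) : Int :=
  let n : Int := arr.length
  let a := arr.map (fun item => item)
  let ab := arr.map (fun _ => (0 : Int))
  let abc := arr.map (fun _ => (0 : Int))
  let abcd := arr.map (fun _ => (0 : Int))
  let a := pvPass n 1 (fun i => PySem.List.pyGetD arr i 0) a
  let ab := pvPass n 1 (fun i => PySem.List.pyGetD a (i - 1) 0 - PySem.List.pyGetD arr i 0) ab
  let abc := pvPass n 2 (fun i => PySem.List.pyGetD ab (i - 1) 0 + PySem.List.pyGetD arr i 0) abc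
  let abcd := pvPass n 3 (fun i => PySem.List.pyGetD abc (i - 1) 0 - PySem.List.pyGetD arr i 0) abcd
  PySem.List.pyGetD abcd (n - 1) 0

-- ===== PORT B =====
def MaximizeExpressionOptimal_alt (arr : List Int) : Int :=
  let a0 := PySem.List.pyGetD arr 0 0   -- arr[0]; the IndexError on [] is excluded by Pre_
  let st := (PySem.List.pyRange 1 arr.length 1).foldl
    (fun (st : Int × Int × Int × Int) i =>
      let (a, ab, abc, abcd) := st
      let x := PySem.List.pyGetD arr i 0
      let abcd := if 3 ≤ i then max (abc - x) abcd else abcd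
      let abc := if 2 ≤ i then max (ab + x) abc else abc
      let ab := max (a - x) ab
      let a := max x a
      (a, ab, abc, abcd)) (a0, 0, 0, 0)
  st.2.2.2

-- ===== PRECONDITION & SPEC =====
-- Pre_ excludes exactly the empty list, on which A raises IndexError (abcd[-1] on an empty list).
def Pre_MaximizeExpressionOptimal (arr : List Int) : Prop := arr ≠ []
instance (arr : List Int) : Decidable (Pre_MaximizeExpressionOptimal arr) := by unfold Pre_MaximizeExpressionOptimal; infer_instance
def pvWitness_MaximizeExpressionOptimal : List Int := [3, -1, 4, -2, 5]

def Spec_MaximizeExpressionOptimal (arr : List Int) (out : Int) : Prop := out = MaximizeExpressionOptimal_alt arr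
instance (arr : List Int) (out : Int) : Decidable (Spec_MaximizeExpressionOptimal arr out) := by unfold Spec_MaximizeExpressionOptimal; infer_instance

-- ===== CLAIM (what is proved, stated in full; the proofs are below) =====
def Claim_equal_MaximizeExpressionOptimal : Prop := ∀ (arr : List Int), Dom_MaximizeExpressionOptimal arr → Pre_MaximizeExpressionOptimal arr → Spec_MaximizeExpressionOptimal arr (MaximizeExpressionOptimal arr)

-- ===== LEMMAS AND PROOFS =====

-- the common DP recurrence: value at 0 is init 0; below s it is init; at j ≥ s it is max (body j) (value at j-1)
def pvR (s : Nat) (init body : Nat → Int) : Nat → Int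
  | 0 => init 0
  | j + 1 => if j + 1 < s then init (j + 1) else max (body (j + 1)) (pvR s init body j)

theorem pvR_of_lt (s : Nat) (init body : Nat → Int) (j : Nat) (h : j < s) :
    pvR s init body j = init j := by
  cases j with
  | zero => rfl
  | succ j => simp [pvR, h]

theorem pvR_congr (s : Nat) (init body body' : Nat → Int) (k : Nat)
    (H : ∀ j, s ≤ j → j ≤ k → body j = body' j) :
    pvR s init body k = pvR s init body' k := by
  induction k with
  | zero => rfl
  | succ k ih =>
    simp only [pvR]
    split_ifs with h
    · rfl
    · rw [H (k+1) (by omega) (le_refl _), ih (fun j h1 h2 => H j h1 (by omega))]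

-- shorthand for natural-number indexing with default 0
def pvGetN (xs : List Int) (j : Nat) : Int := xs.getD j 0

theorem pvGetD_int (xs : List Int) (j : Nat) :
    PySem.List.pyGetD xs (j : Int) 0 = pvGetN xs j := by
  simp [PySem.List.pyGetD_natCast, pvGetN]

-- the pass invariant: after running pvPass up to bound k, positions j < k hold pvR, the rest are untouched
theorem pvPass_spec (s : Nat) (hs : 1 ≤ s) (body : Int → Int) (xs0 : List Int) :
    ∀ k : Nat, k ≤ xs0.length →
      (((PySem.List.pyRange s k 1).foldl
          (fun xs i => xs.set i.toNat (max (body i) (PySem.List.pyGetD xs (i - 1) 0))) xs0).length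
        = xs0.length) ∧
      ∀ j : Nat,
        pvGetN ((PySem.List.pyRange s k 1).foldl
          (fun xs i => xs.set i.toNat (max (body i) (PySem.List.pyGetD xs (i - 1) 0))) xs0) j
        = if j < k then pvR s (pvGetN xs0) (fun j => body (j : Int)) j else pvGetN xs0 j := by
  intro k
  induction k with
  | zero =>
    intro _
    rw [PySem.List.pyRange_one_eq_nil (by exact_mod_cast Nat.zero_le s)]
    simp
  | succ k ih =>
    intro hk
    by_cases hks : k + 1 ≤ s
    · rw [PySem.List.pyRange_one_eq_nil (by exact_mod_cast hks)]
      refine ⟨rfl, fun j => ?_⟩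
      simp only [List.foldl_nil]
      split_ifs with hj
      · rw [pvR_of_lt s _ _ j (by omega)]
      · rfl
    · have hsk : (s : Int) ≤ (k : Int) := by exact_mod_cast (by omega : s ≤ k)
      have hsplit : PySem.List.pyRange (s : Int) ((k : Nat) + 1 : Nat) 1
          = PySem.List.pyRange (s : Int) (k : Nat) 1 ++ [(k : Int)] := by
        have : (((k : Nat) + 1 : Nat) : Int) = (k : Int) + 1 := by push_cast; ring
        rw [this, PySem.List.pyRange_one_succ_right hsk]
      obtain ⟨ihlen, ihget⟩ := ih (by omega)
      rw [hsplit, List.foldl_append]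
      set ys := (PySem.List.pyRange (s : Int) (k : Nat) 1).foldl
          (fun xs i => xs.set i.toNat (max (body i) (PySem.List.pyGetD xs (i - 1) 0))) xs0 with hys
      simp only [List.foldl_cons, List.foldl_nil]
      have hklen : k < xs0.length := by omega
      have hprev : PySem.List.pyGetD ys ((k : Int) - 1) 0 = pvR s (pvGetN xs0) (fun j => body (j : Int)) (k - 1) := by
        have hcast : ((k : Int) - 1) = ((k - 1 : Nat) : Int) := by omega
        rw [hcast, pvGetD_int, ihget (k - 1), if_pos (by omega)]
      constructor
      · simp [ihlen]
      · intro j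
        have htoNat : ((k : Int)).toNat = k := by simp
        by_cases hjk : j = k
        · rw [if_pos (by omega)]
          have hset : pvGetN (ys.set ((k : Int)).toNat (max (body (k : Int)) (PySem.List.pyGetD ys ((k : Int) - 1) 0))) j
              = max (body (k : Int)) (PySem.List.pyGetD ys ((k : Int) - 1) 0) := by
            rw [htoNat, hjk]
            simp [pvGetN, List.getD, ihlen, hklen]
          rw [hset, hprev, hjk]
          have hk1 : k = (k - 1) + 1 := by omega
          conv_rhs => rw [hk1]
          simp only [pvR]
          rw [if_neg (by omega), ← hk1]
        · have : pvGetN (ys.set ((k : Int)).toNat (max (body (k : Int)) (PySem.List.pyGetD ys ((k : Int) - 1) 0))) j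
              = pvGetN ys j := by
            rw [htoNat]
            simp [pvGetN, List.getD, List.getElem?_set_ne (by omega : k ≠ j)]
          rw [this, ihget j]
          split_ifs <;> first | rfl | omega

-- the four DP sequences that both programs compute
def pvA (arr : List Int) : Nat → Int := pvR 1 (pvGetN arr) (pvGetN arr)
def pvAB (arr : List Int) : Nat → Int := pvR 1 (fun _ => 0) (fun j => pvA arr (j - 1) - pvGetN arr j)
def pvABC (arr : List Int) : Nat → Int := pvR 2 (fun _ => 0) (fun j => pvAB arr (j - 1) + pvGetN arr j)
def pvABCD (arr : List Int) : Nat → Int := pvR 3 (fun _ => 0) (fun j => pvABC arr (j - 1) - pvGetN arr j)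

theorem zeros_getN (arr : List Int) (j : Nat) : pvGetN (arr.map (fun _ => (0 : Int))) j = 0 := by
  induction arr generalizing j with
  | nil => rfl
  | cons x xs ih => cases j with
    | zero => rfl
    | succ j => exact ih j

-- pvPass_spec restated in terms of pvPass itself
theorem pvPass_char (s : Nat) (hs : 1 ≤ s) (body : Int → Int) (xs0 : List Int) (k : Nat)
    (hk : k ≤ xs0.length) :
    (pvPass (k : Int) (s : Int) body xs0).length = xs0.length ∧
    ∀ j : Nat, pvGetN (pvPass (k : Int) (s : Int) body xs0) j
      = if j < k then pvR s (pvGetN xs0) (fun j => body (j : Int)) j else pvGetN xs0 j := by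
  unfold pvPass
  exact pvPass_spec s hs body xs0 k hk

theorem A_eq_spec (arr : List Int) (h : arr ≠ []) :
    MaximizeExpressionOptimal arr = pvABCD arr (arr.length - 1) := by
  have hlen : 1 ≤ arr.length := List.length_pos_iff.mpr h
  have hzeros : pvGetN (arr.map (fun _ => (0 : Int))) = fun _ => (0 : Int) :=
    funext (zeros_getN arr)
  have hzlen : (arr.map (fun _ => (0 : Int))).length = arr.length := by simp
  unfold MaximizeExpressionOptimal
  dsimp only
  rw [List.map_id']
  -- pass 1
  set L1 := pvPass (arr.length : Int) 1 (fun i => PySem.List.pyGetD arr i 0) arr with hL1def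
  have h1 : ∀ j : Nat, j < arr.length → pvGetN L1 j = pvA arr j := by
    intro j hj
    have hc := pvPass_char 1 (le_refl 1) (fun i => PySem.List.pyGetD arr i 0) arr arr.length (le_refl _)
    simp only [Nat.cast_one] at hc
    rw [hL1def, hc.2 j, if_pos hj]
    exact pvR_congr 1 _ _ _ j (fun i _ _ => pvGetD_int arr i)
  -- pass 2
  set L2 := pvPass (arr.length : Int) 1
      (fun i => PySem.List.pyGetD L1 (i - 1) 0 - PySem.List.pyGetD arr i 0)
      (arr.map (fun _ => (0 : Int))) with hL2def
  have h2 : ∀ j : Nat, j < arr.length → pvGetN L2 j = pvAB arr j := by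
    intro j hj
    have hc := pvPass_char 1 (le_refl 1)
      (fun i => PySem.List.pyGetD L1 (i - 1) 0 - PySem.List.pyGetD arr i 0)
      (arr.map (fun _ => (0 : Int))) arr.length (le_of_eq hzlen.symm)
    simp only [Nat.cast_one] at hc
    rw [hL2def, hc.2 j, if_pos hj, hzeros]
    refine pvR_congr 1 _ _ _ j (fun i hi1 hi2 => ?_)
    have hcast : ((i : Int) - 1) = ((i - 1 : Nat) : Int) := by omega
    rw [hcast, pvGetD_int, pvGetD_int, h1 (i - 1) (by omega)]
  -- pass 3
  set L3 := pvPass (arr.length : Int) 2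
      (fun i => PySem.List.pyGetD L2 (i - 1) 0 + PySem.List.pyGetD arr i 0)
      (arr.map (fun _ => (0 : Int))) with hL3def
  have h3 : ∀ j : Nat, j < arr.length → pvGetN L3 j = pvABC arr j := by
    intro j hj
    have hc := pvPass_char 2 (by norm_num)
      (fun i => PySem.List.pyGetD L2 (i - 1) 0 + PySem.List.pyGetD arr i 0)
      (arr.map (fun _ => (0 : Int))) arr.length (le_of_eq hzlen.symm)
    simp only [Nat.cast_ofNat] at hc
    rw [hL3def, hc.2 j, if_pos hj, hzeros]
    refine pvR_congr 2 _ _ _ j (fun i hi1 hi2 => ?_)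
    have hcast : ((i : Int) - 1) = ((i - 1 : Nat) : Int) := by omega
    rw [hcast, pvGetD_int, pvGetD_int, h2 (i - 1) (by omega)]
  -- pass 4
  set L4 := pvPass (arr.length : Int) 3
      (fun i => PySem.List.pyGetD L3 (i - 1) 0 - PySem.List.pyGetD arr i 0)
      (arr.map (fun _ => (0 : Int))) with hL4def
  have h4 : ∀ j : Nat, j < arr.length → pvGetN L4 j = pvABCD arr j := by
    intro j hj
    have hc := pvPass_char 3 (by norm_num)
      (fun i => PySem.List.pyGetD L3 (i - 1) 0 - PySem.List.pyGetD arr i 0)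
      (arr.map (fun _ => (0 : Int))) arr.length (le_of_eq hzlen.symm)
    simp only [Nat.cast_ofNat] at hc
    rw [hL4def, hc.2 j, if_pos hj, hzeros]
    refine pvR_congr 3 _ _ _ j (fun i hi1 hi2 => ?_)
    have hcast : ((i : Int) - 1) = ((i - 1 : Nat) : Int) := by omega
    rw [hcast, pvGetD_int, pvGetD_int, h3 (i - 1) (by omega)]
  -- the final read abcd[len(arr)-1]
  have hcast : ((arr.length : Int) - 1) = ((arr.length - 1 : Nat) : Int) := by omega
  rw [hcast, pvGetD_int, h4 (arr.length - 1) (by omega)]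

theorem B_fold (arr : List Int) :
    ∀ k : Nat, 1 ≤ k → k ≤ arr.length →
      ((PySem.List.pyRange 1 (k : Int) 1).foldl
        (fun (st : Int × Int × Int × Int) i =>
          let (a, ab, abc, abcd) := st
          let x := PySem.List.pyGetD arr i 0
          let abcd := if 3 ≤ i then max (abc - x) abcd else abcd
          let abc := if 2 ≤ i then max (ab + x) abc else abc
          let ab := max (a - x) ab
          let a := max x a
          (a, ab, abc, abcd)) (PySem.List.pyGetD arr 0 0, 0, 0, 0))
      = (pvA arr (k - 1), pvAB arr (k - 1), pvABC arr (k - 1), pvABCD arr (k - 1)) := by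
  intro k
  induction k with
  | zero => omega
  | succ k ih =>
    intro _ hk
    by_cases hk1 : k = 0
    · subst hk1
      rw [PySem.List.pyRange_one_eq_nil (by norm_num)]
      simp only [List.foldl_nil]
      have h0 : PySem.List.pyGetD arr 0 0 = pvGetN arr 0 := by
        have := pvGetD_int arr 0
        simpa using this
      rw [h0]
      rfl
    · have hksucc : ((k + 1 : Nat) : Int) = (k : Int) + 1 := by push_cast; ring
      have hsplit : PySem.List.pyRange 1 ((k + 1 : Nat) : Int) 1
          = PySem.List.pyRange 1 (k : Int) 1 ++ [(k : Int)] := by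
        rw [hksucc, PySem.List.pyRange_one_succ_right (by exact_mod_cast (by omega : 1 ≤ k))]
      rw [hsplit, List.foldl_append, ih (by omega) (by omega)]
      simp only [List.foldl_cons, List.foldl_nil]
      have hx : PySem.List.pyGetD arr (k : Int) 0 = pvGetN arr k := pvGetD_int arr k
      have hkk : k = (k - 1) + 1 := by omega
      have ha : max (pvGetN arr k) (pvA arr (k - 1)) = pvA arr k := by
        conv_rhs => rw [show pvA arr = pvR 1 (pvGetN arr) (pvGetN arr) from rfl, hkk]
        simp only [pvR]
        rw [if_neg (by omega)]
        rw [← hkk]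
        rfl
      have hab : max (pvA arr (k - 1) - pvGetN arr k) (pvAB arr (k - 1)) = pvAB arr k := by
        conv_rhs => rw [show pvAB arr = pvR 1 (fun _ => 0) (fun j => pvA arr (j - 1) - pvGetN arr j) from rfl, hkk]
        simp only [pvR]
        rw [if_neg (by omega)]
        rw [← hkk]
        rfl
      have habc : (if 2 ≤ (k : Int) then max (pvAB arr (k - 1) + pvGetN arr k) (pvABC arr (k - 1)) else pvABC arr (k - 1)) = pvABC arr k := by
        by_cases h2 : 2 ≤ k
        · rw [if_pos (by exact_mod_cast h2)]
          conv_rhs => rw [show pvABC arr = pvR 2 (fun _ => 0) (fun j => pvAB arr (j - 1) + pvGetN arr j) from rfl, hkk]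
          simp only [pvR]
          rw [if_neg (by omega)]
          rw [← hkk]
          rfl
        · rw [if_neg (by exact_mod_cast h2)]
          unfold pvABC
          rw [pvR_of_lt 2 _ _ (k - 1) (by omega), pvR_of_lt 2 _ _ k (by omega)]
      have habcd : (if 3 ≤ (k : Int) then max (pvABC arr (k - 1) - pvGetN arr k) (pvABCD arr (k - 1)) else pvABCD arr (k - 1)) = pvABCD arr k := by
        by_cases h3 : 3 ≤ k
        · rw [if_pos (by exact_mod_cast h3)]
          conv_rhs => rw [show pvABCD arr = pvR 3 (fun _ => 0) (fun j => pvABC arr (j - 1) - pvGetN arr j) from rfl, hkk]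
          simp only [pvR]
          rw [if_neg (by omega)]
          rw [← hkk]
          rfl
        · rw [if_neg (by exact_mod_cast h3)]
          unfold pvABCD
          rw [pvR_of_lt 3 _ _ (k - 1) (by omega), pvR_of_lt 3 _ _ k (by omega)]
      rw [hx, habcd, habc, hab, ha]
      simp

theorem B_eq_spec (arr : List Int) (h : arr ≠ []) :
    MaximizeExpressionOptimal_alt arr = pvABCD arr (arr.length - 1) := by
  have hlen : 1 ≤ arr.length := List.length_pos_iff.mpr h
  have hb := B_fold arr arr.length hlen (le_refl _)
  unfold MaximizeExpressionOptimal_alt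
  exact congrArg (fun t : Int × Int × Int × Int => t.2.2.2) hb

-- ===== VERDICT (by name: the statement is the Claim_ definition above) =====
theorem MaximizeExpressionOptimal_spec : Claim_equal_MaximizeExpressionOptimal := by
  intro arr _ hpre
  unfold Spec_MaximizeExpressionOptimal
  rw [A_eq_spec arr hpre, B_eq_spec arr hpre]
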